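-- pv_equiv track=rewrite | github.com/siddhanth78/YourMOM | YourMOM.py | check_dirs
-- ===== SOURCE A (Python) =====
-- def check_dirs(query, paths):
--     pathli = []
--     for p in paths:
--         if p.startswith(query):
--             pathli.append(p)
--     others = [x for x in paths if x not in pathli and query in x]
--     pathli.extend(others)
--     return pathli
-- ===== SOURCE B (Python) =====
-- def check_dirs(query, paths):
--     prefix = []
--     sub = []
--     for p in paths:
--         if p.startswith(query):
--             prefix.append(p)
--         elif query in p:
--             sub.append(p)
--     return prefix + sub
-- ===== Notes on version B (the rewrite author's own statement) =====
-- stated objective: simpler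
-- what changed: One pass maintaining two buckets (prefix matches, substring-only matches) replaces A's two passes and its redundant 'x not in pathli' membership scan.
import Mathlib
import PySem

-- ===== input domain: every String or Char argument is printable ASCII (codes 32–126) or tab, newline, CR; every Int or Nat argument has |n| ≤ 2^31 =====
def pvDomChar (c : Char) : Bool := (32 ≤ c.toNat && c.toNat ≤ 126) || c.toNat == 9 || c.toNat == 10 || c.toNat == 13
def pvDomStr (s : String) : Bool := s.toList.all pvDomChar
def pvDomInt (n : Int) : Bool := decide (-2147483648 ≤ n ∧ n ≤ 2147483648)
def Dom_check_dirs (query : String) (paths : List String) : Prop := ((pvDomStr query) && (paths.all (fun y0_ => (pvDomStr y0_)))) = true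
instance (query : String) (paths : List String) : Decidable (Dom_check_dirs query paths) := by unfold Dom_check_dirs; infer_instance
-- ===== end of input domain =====

-- B replaces A's two passes (and the redundant 'x not in pathli' scan) by one pass with two buckets; objective: simpler.

-- ===== PORT A =====
def check_dirs (query : String) (paths : List String) : List String :=
  let pathli := paths.foldl (fun acc p => if PySem.Str.startswith p query then acc ++ [p] else acc) []
  let others := paths.filter (fun x => !(pathli.contains x) && PySem.Str.isIn query x)
  pathli ++ others

-- ===== PORT B =====
def check_dirs_alt (query : String) (paths : List String) : List String :=
  let bk := paths.foldl (fun (acc : List String × List String) p =>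
      if PySem.Str.startswith p query then (acc.1 ++ [p], acc.2)
      else if PySem.Str.isIn query p then (acc.1, acc.2 ++ [p])
      else acc) ([], [])
  bk.1 ++ bk.2

-- ===== PRECONDITION & SPEC =====
def Spec_check_dirs (query : String) (paths : List String) (out : List String) : Prop := out = check_dirs_alt query paths
instance (query : String) (paths : List String) (out : List String) : Decidable (Spec_check_dirs query paths out) := by unfold Spec_check_dirs; infer_instance

-- ===== CLAIM (what is proved, stated in full; the proofs are below) =====
def Claim_equal_check_dirs : Prop := ∀ (query : String) (paths : List String), Dom_check_dirs query paths → Spec_check_dirs query paths (check_dirs query paths)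

-- ===== LEMMAS AND PROOFS =====

-- B's fold fills the two buckets with the two filters.
theorem alt_fold_eq (query : String) (paths : List String) (a b : List String) :
    paths.foldl (fun (acc : List String × List String) p =>
      if PySem.Str.startswith p query then (acc.1 ++ [p], acc.2)
      else if PySem.Str.isIn query p then (acc.1, acc.2 ++ [p])
      else acc) (a, b)
    = (a ++ paths.filter (fun p => PySem.Str.startswith p query),
       b ++ paths.filter (fun p => !PySem.Str.startswith p query && PySem.Str.isIn query p)) := by
  induction paths generalizing a b with
  | nil => simp
  | cons p ps ih =>
    simp only [List.foldl_cons]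
    by_cases hs : PySem.Str.startswith p query = true
    · rw [if_pos hs, ih]
      simp only [PySem.Str.startswith_eq] at hs
      simp [hs]
    · by_cases hc : PySem.Str.isIn query p = true
      · rw [if_neg hs, if_pos hc, ih]
        simp only [PySem.Str.startswith_eq] at hs
        simp only [PySem.Str.isIn_eq] at hc
        simp [hs, hc]
      · rw [if_neg hs, if_neg hc, ih]
        simp only [PySem.Str.startswith_eq] at hs
        simp only [PySem.Str.isIn_eq] at hc
        simp [hs, hc]

-- In A, a path is in pathli iff it starts with query (it is drawn from paths).
theorem contains_prefix_filter (query : String) (paths : List String) (x : String)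
    (hx : x ∈ paths) :
    (paths.filter (fun p => PySem.Str.startswith p query)).contains x
      = PySem.Str.startswith x query := by
  by_cases h : PySem.Chars.startswith x.toList query.toList = true
  · simp [h, List.mem_filter, hx]
  · simp only [List.contains_eq_mem, List.mem_filter]
    simp [h]

-- ===== VERDICT (by name: the statement is the Claim_ definition above) =====
theorem check_dirs_spec : Claim_equal_check_dirs := by
  intro query paths _
  unfold Spec_check_dirs check_dirs check_dirs_alt
  rw [PySem.List.foldl_append_if_eq_filter, alt_fold_eq]
  simp only [List.nil_append]
  congr 1
  apply List.filter_congr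
  intro x hx
  rw [contains_prefix_filter query paths x hx]
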